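-- pv_equiv track=rewrite | github.com/ARYAN-NIKNEZHAD/Data_Structures | Code/Big_O/Disjoint.py | disjoint2
-- ===== SOURCE A (Python) =====
-- def disjoint2(arr, arr2, arr3):
--     for i in arr:
--         for j in arr2:
--             if i == j:
--                 for k in arr3:
--                     if i == k:
--                         return False
--     return True
-- ===== SOURCE B (Python) =====
-- def disjoint2(arr, arr2, arr3):
--     common = set(arr) & set(arr2)
--     return not any(x in common for x in arr3)
-- ===== Notes on version B (the rewrite author's own statement) =====
-- stated objective: simpler
-- what changed: Replaces the three nested equality scans with a set intersection of the first two arrays built once, followed by a single membership pass over the third array.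
import Mathlib
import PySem

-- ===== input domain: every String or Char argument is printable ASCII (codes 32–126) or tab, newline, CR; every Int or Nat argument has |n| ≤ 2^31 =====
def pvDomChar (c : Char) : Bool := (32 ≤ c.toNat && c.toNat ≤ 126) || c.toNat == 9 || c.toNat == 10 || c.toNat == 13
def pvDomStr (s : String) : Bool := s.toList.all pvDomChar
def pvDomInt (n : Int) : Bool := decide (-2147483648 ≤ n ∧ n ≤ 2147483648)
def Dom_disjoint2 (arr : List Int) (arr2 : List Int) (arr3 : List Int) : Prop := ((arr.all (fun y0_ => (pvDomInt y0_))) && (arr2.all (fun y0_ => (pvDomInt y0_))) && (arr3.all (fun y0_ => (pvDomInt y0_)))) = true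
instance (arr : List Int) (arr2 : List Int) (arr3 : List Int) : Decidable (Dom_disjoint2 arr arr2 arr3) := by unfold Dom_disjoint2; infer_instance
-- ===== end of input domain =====

-- B replaces A's three nested equality scans by a set intersection of the first two lists plus one membership pass over the third (simpler, single-pass shape).


-- ===== PORT A =====
-- for k in arr3: if i == k: return False
def loop3 (i : Int) : List Int → Bool
  | [] => false
  | k :: rest => if i = k then true else loop3 i rest

-- for j in arr2: if i == j: (inner loop over arr3)
def loop2 (i : Int) (arr3 : List Int) : List Int → Bool
  | [] => false
  | j :: rest => if i = j then (if loop3 i arr3 then true else loop2 i arr3 rest) else loop2 i arr3 rest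

-- for i in arr: … ; return True
def disjoint2 (arr : List Int) (arr2 : List Int) (arr3 : List Int) : Bool :=
  match arr with
  | [] => true
  | i :: rest => if loop2 i arr3 arr2 then false else disjoint2 rest arr2 arr3

-- ===== PORT B =====
-- common = set(arr) & set(arr2); return not any(x in common for x in arr3)
def disjoint2_alt (arr : List Int) (arr2 : List Int) (arr3 : List Int) : Bool :=
  let common := PySem.Set.inter (PySem.Set.ofList arr) (PySem.Set.ofList arr2)
  !(arr3.any (fun x => PySem.Set.contains common x))

-- ===== PRECONDITION & SPEC =====
def Spec_disjoint2 (arr : List Int) (arr2 : List Int) (arr3 : List Int) (out : Bool) : Prop := out = disjoint2_alt arr arr2 arr3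
instance (arr : List Int) (arr2 : List Int) (arr3 : List Int) (out : Bool) : Decidable (Spec_disjoint2 arr arr2 arr3 out) := by unfold Spec_disjoint2; infer_instance

-- ===== CLAIM (what is proved, stated in full; the proofs are below) =====
def Claim_equal_disjoint2 : Prop := ∀ (arr : List Int) (arr2 : List Int) (arr3 : List Int), Dom_disjoint2 arr arr2 arr3 → Spec_disjoint2 arr arr2 arr3 (disjoint2 arr arr2 arr3)

-- ===== LEMMAS AND PROOFS =====

-- ===== VERDICT (by name: the statement is the Claim_ definition above) =====
theorem loop3_iff (i : Int) (l : List Int) : loop3 i l = true ↔ i ∈ l := by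
  induction l with
  | nil => simp [loop3]
  | cons k rest ih => by_cases h : i = k <;> simp [loop3, h, ih]

theorem loop2_iff (i : Int) (arr3 l : List Int) :
    loop2 i arr3 l = true ↔ i ∈ l ∧ i ∈ arr3 := by
  induction l with
  | nil => simp [loop2]
  | cons j rest ih =>
    by_cases h : i = j
    · by_cases h3 : loop3 i arr3 = true <;>
        simp_all [loop2, loop3_iff, h]
    · simp [loop2, h, ih]

theorem disjoint2_iff (arr arr2 arr3 : List Int) :
    disjoint2 arr arr2 arr3 = true ↔ ∀ i ∈ arr, ¬ (i ∈ arr2 ∧ i ∈ arr3) := by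
  induction arr with
  | nil => simp [disjoint2]
  | cons i rest ih =>
    by_cases h : loop2 i arr3 arr2 = true
    · have hm := (loop2_iff i arr3 arr2).mp h
      simp only [disjoint2, h, if_true, Bool.false_eq_true, false_iff, not_forall]
      exact ⟨i, by simp, not_not_intro hm⟩
    · rw [loop2_iff] at h
      simp [disjoint2, loop2_iff, h, ih]
      tauto

theorem disjoint2_alt_iff (arr arr2 arr3 : List Int) :
    disjoint2_alt arr arr2 arr3 = true ↔ ∀ i ∈ arr, ¬ (i ∈ arr2 ∧ i ∈ arr3) := by
  simp [disjoint2_alt, PySem.Set.mem_inter, PySem.Set.mem_ofList]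
  tauto

-- ===== VERDICT =====
theorem disjoint2_spec : Claim_equal_disjoint2 := by
  intro arr arr2 arr3 _
  unfold Spec_disjoint2
  rcases h : disjoint2_alt arr arr2 arr3 with _ | _
  · rcases h2 : disjoint2 arr arr2 arr3 with _ | _
    · rfl
    · exact absurd ((disjoint2_alt_iff ..).mpr ((disjoint2_iff ..).mp h2)) (by simp [h])
  · exact (disjoint2_iff ..).mpr ((disjoint2_alt_iff ..).mp h)
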